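-- pv_equiv track=rewrite | github.com/mochang2/coding-test | Programmers/3단계/길 찾기 게임.py | groupByY
-- ===== SOURCE A (Python) =====
-- def extractYAxis(node):
--     return (node[0], node[2])
--
-- def groupByY(nodes_info):
--     nodes_info_grouped_by_y = []
--     left = 0
--     right = 0
--
--     while left < len(nodes_info):
--         while right < len(nodes_info) and nodes_info[left][1] == nodes_info[right][1]:
--             right += 1
--
--         same_y_axis = list(map(extractYAxis, nodes_info[left:right]))
--         nodes_info_grouped_by_y.append(same_y_axis)
--         left = right
--
--     return nodes_info_grouped_by_y
-- ===== SOURCE B (Python) =====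
-- def extractYAxis(node):
--     return (node[0], node[2])
--
-- def groupByY(nodes_info):
--     result = []
--     current = []
--     prev_y = None
--     for node in nodes_info:
--         if current and node[1] == prev_y:
--             current.append(extractYAxis(node))
--         else:
--             if current:
--                 result.append(current)
--             current = [extractYAxis(node)]
--         prev_y = node[1]
--     if current:
--         result.append(current)
--     return result
-- ===== Notes on version B (the rewrite author's own statement) =====
-- stated objective: simpler
-- what changed: Replaces A's nested while loops with two index pointers and a slice per group by a single linear pass that extends a current-run accumulator and flushes it whenever the y value changes.
import Mathlib
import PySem

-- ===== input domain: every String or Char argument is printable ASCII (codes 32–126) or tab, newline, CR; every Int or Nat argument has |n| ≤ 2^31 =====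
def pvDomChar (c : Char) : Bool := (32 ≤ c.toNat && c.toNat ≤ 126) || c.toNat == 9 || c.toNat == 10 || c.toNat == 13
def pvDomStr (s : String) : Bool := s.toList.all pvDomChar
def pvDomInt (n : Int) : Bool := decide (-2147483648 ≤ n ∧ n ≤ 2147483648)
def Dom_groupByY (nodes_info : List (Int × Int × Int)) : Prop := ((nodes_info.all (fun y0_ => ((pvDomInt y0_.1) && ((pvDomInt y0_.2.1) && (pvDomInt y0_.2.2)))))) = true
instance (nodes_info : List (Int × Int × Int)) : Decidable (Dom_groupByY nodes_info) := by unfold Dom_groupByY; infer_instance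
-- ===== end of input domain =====

-- B replaces A's outer/inner two-pointer + slice grouping by one linear pass that
-- grows the current run and flushes it when the y value changes (objective: simpler).

-- ===== PORT A =====
-- extractYAxis(node) = (node[0], node[2])
def pvExtractY (node : Int × Int × Int) : Int × Int := (node.1, node.2.2)

-- nodes_info[i][1]; both callers only use it with i < len(nodes_info), so the
-- default value is never the result (exact on in-range indices).
def pvGetY (nodes : List (Int × Int × Int)) (i : Nat) : Int := (nodes.getD i (0, 0, 0)).2.1

-- the inner while: advance right while right < len and nodes[left][1] == nodes[right][1]
def groupByY_inner (nodes : List (Int × Int × Int)) (left right : Nat) : Nat :=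
  if h : right < nodes.length ∧ pvGetY nodes left = pvGetY nodes right then
    groupByY_inner nodes left (right + 1)
  else
    right
termination_by nodes.length - right
decreasing_by omega

-- termination facts for the outer loop (cited by name in decreasing_by)
theorem pv_inner_ge (nodes : List (Int × Int × Int)) (left right : Nat) :
    right ≤ groupByY_inner nodes left right := by
  fun_induction groupByY_inner nodes left right with
  | case1 _ _ ih => omega
  | case2 => omega

theorem pv_inner_gt (nodes : List (Int × Int × Int)) (left : Nat)
    (hlen : left < nodes.length) : left < groupByY_inner nodes left left := by
  rw [groupByY_inner]
  simp only [hlen, true_and]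
  have := pv_inner_ge nodes left (left + 1)
  simpa using by omega

-- the outer while over left (left = right at the start of each iteration, as in A)
def groupByY_outer (nodes : List (Int × Int × Int)) (left : Nat) : List (List (Int × Int)) :=
  if h : left < nodes.length then
    ((PySem.List.slice nodes (some (left : Int)) (some ((groupByY_inner nodes left left : Nat) : Int))).map pvExtractY)
      :: groupByY_outer nodes (groupByY_inner nodes left left)
  else
    []
termination_by nodes.length - left
decreasing_by
  have h1 : left < groupByY_inner nodes left left := pv_inner_gt nodes left h
  omega

def groupByY (nodes_info : List (Int × Int × Int)) : List (List (Int × Int)) :=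
  groupByY_outer nodes_info 0

-- ===== PORT B =====
-- the loop body of Source B: state = (result, current, prev_y)
def pvStepB (st : List (List (Int × Int)) × List (Int × Int) × Option Int)
    (node : Int × Int × Int) : List (List (Int × Int)) × List (Int × Int) × Option Int :=
  if st.2.1 ≠ [] ∧ st.2.2 = some node.2.1 then
    (st.1, st.2.1 ++ [pvExtractY node], some node.2.1)
  else
    ((if st.2.1 ≠ [] then st.1 ++ [st.2.1] else st.1), [pvExtractY node], some node.2.1)

-- the trailing 'if current: result.append(current)'
def pvFinishB (st : List (List (Int × Int)) × List (Int × Int) × Option Int) :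
    List (List (Int × Int)) :=
  if st.2.1 ≠ [] then st.1 ++ [st.2.1] else st.1

def groupByY_alt (nodes_info : List (Int × Int × Int)) : List (List (Int × Int)) :=
  pvFinishB (nodes_info.foldl pvStepB ([], [], none))

-- ===== PRECONDITION & SPEC =====
def Spec_groupByY (nodes_info : List (Int × Int × Int)) (out : List (List (Int × Int))) : Prop := out = groupByY_alt nodes_info
instance (nodes_info : List (Int × Int × Int)) (out : List (List (Int × Int))) : Decidable (Spec_groupByY nodes_info out) := by unfold Spec_groupByY; infer_instance

-- ===== CLAIM (what is proved, stated in full; the proofs are below) =====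
def Claim_equal_groupByY : Prop := ∀ (nodes_info : List (Int × Int × Int)), Dom_groupByY nodes_info → Spec_groupByY nodes_info (groupByY nodes_info)

-- ===== LEMMAS AND PROOFS =====

-- reference description of the grouping: chunks of consecutive equal y
def pvGrp : List (Int × Int × Int) → List (List (Int × Int))
  | [] => []
  | x :: xs =>
      ((x :: xs.takeWhile (fun n => n.2.1 == x.2.1)).map pvExtractY)
        :: pvGrp (xs.dropWhile (fun n => n.2.1 == x.2.1))
termination_by l => l.length
decreasing_by
  have := List.length_dropWhile_le (fun n => n.2.1 == x.2.1) xs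
  simp; omega

theorem pv_take_takeWhile {α : Type} (p : α → Bool) (l : List α) :
    l.take (l.takeWhile p).length = l.takeWhile p := by
  induction l with
  | nil => rfl
  | cons x xs ih =>
    by_cases h : p x
    · simp [h, ih]
    · simp [h]

theorem pv_drop_takeWhile {α : Type} (p : α → Bool) (l : List α) :
    l.drop (l.takeWhile p).length = l.dropWhile p := by
  induction l with
  | nil => rfl
  | cons x xs ih =>
    by_cases h : p x
    · simp [List.dropWhile_cons, h, ih]
    · simp [h]

-- characterisation of A's inner while
theorem pv_inner_char (nodes : List (Int × Int × Int)) (left right : Nat) :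
    groupByY_inner nodes left right
      = right + ((nodes.drop right).takeWhile (fun n => n.2.1 == pvGetY nodes left)).length := by
  fun_induction groupByY_inner nodes left right with
  | case1 right h ih =>
    obtain ⟨hr, hy⟩ := h
    rw [List.drop_eq_getElem_cons hr]
    have hg : pvGetY nodes right = nodes[right].2.1 := by
      simp [pvGetY, List.getD_eq_getElem?_getD, List.getElem?_eq_getElem hr]
    rw [List.takeWhile_cons]
    simp only [← hy, hg.symm, beq_self_eq_true, if_true]
    simp [ih]; omega
  | case2 right h =>
    by_cases hr : right < nodes.length
    · have hy : ¬ pvGetY nodes left = pvGetY nodes right := fun hc => h ⟨hr, hc⟩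
      rw [List.drop_eq_getElem_cons hr, List.takeWhile_cons]
      have hg : pvGetY nodes right = nodes[right].2.1 := by
        simp [pvGetY, List.getD_eq_getElem?_getD, List.getElem?_eq_getElem hr]
      have : (nodes[right].2.1 == pvGetY nodes left) = false := by
        rw [← hg]; simp [beq_eq_false_iff_ne]; exact fun hc => hy hc.symm
      simp [this]
    · rw [List.drop_eq_nil_of_le (by omega)]; simp

-- A's outer while equals pvGrp of the remaining suffix
theorem pv_outer_grp (nodes : List (Int × Int × Int)) (left : Nat) :
    groupByY_outer nodes left = pvGrp (nodes.drop left) := by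
  fun_induction groupByY_outer nodes left with
  | case1 left h ih =>
    have hdrop : nodes.drop left = nodes[left] :: nodes.drop (left + 1) :=
      List.drop_eq_getElem_cons h
    have hg : pvGetY nodes left = nodes[left].2.1 := by
      simp [pvGetY, List.getD_eq_getElem?_getD, List.getElem?_eq_getElem h]
    set p : (Int × Int × Int) → Bool := fun n => n.2.1 == nodes[left].2.1 with hp
    set t : Nat := ((nodes.drop (left + 1)).takeWhile p).length with ht
    have hinner : groupByY_inner nodes left left = left + 1 + t := by
      rw [pv_inner_char, hdrop, List.takeWhile_cons]
      simp only [← hg]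
      simp [hg, ht, hp]; omega
    have hslice : PySem.List.slice nodes (some (left : Int))
        (some ((groupByY_inner nodes left left : Nat) : Int))
        = nodes[left] :: (nodes.drop (left + 1)).takeWhile p := by
      rw [PySem.List.slice_natCast, hdrop]
      have he : groupByY_inner nodes left left - left = t + 1 := by omega
      rw [he, List.take_succ_cons, ht, pv_take_takeWhile]
    have hdrop2 : nodes.drop (groupByY_inner nodes left left)
        = (nodes.drop (left + 1)).dropWhile p := by
      rw [hinner, ← pv_drop_takeWhile p (nodes.drop (left + 1)), ← ht, List.drop_drop]
    rw [ih, hslice, hdrop2, hdrop, pvGrp, hp]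
  | case2 left h =>
    rw [List.drop_eq_nil_of_le (by omega)]
    simp [pvGrp]

-- B's run accumulator
def pvG (cur : List (Int × Int)) (y : Int) : List (Int × Int × Int) → List (List (Int × Int))
  | [] => [cur]
  | x :: xs => if x.2.1 = y then pvG (cur ++ [pvExtractY x]) y xs
               else cur :: pvG [pvExtractY x] x.2.1 xs

theorem pv_foldB (l : List (Int × Int × Int)) :
    ∀ (result : List (List (Int × Int))) (cur : List (Int × Int)) (y : Int), cur ≠ [] →
      pvFinishB (l.foldl pvStepB (result, cur, some y)) = result ++ pvG cur y l := by
  induction l with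
  | nil => intro result cur y hc; simp [pvFinishB, pvG, hc]
  | cons x xs ih =>
    intro result cur y hc
    by_cases hy : x.2.1 = y
    · have hstep : pvStepB (result, cur, some y) x = (result, cur ++ [pvExtractY x], some x.2.1) := by
        simp [pvStepB, hc, hy]
      simp only [List.foldl_cons, hstep, hy]
      rw [ih result (cur ++ [pvExtractY x]) y (by simp)]
      simp [pvG, hy]
    · have hstep : pvStepB (result, cur, some y) x
          = (result ++ [cur], [pvExtractY x], some x.2.1) := by
        simp [pvStepB, hc]
        intro h; exact absurd h.symm hy
      simp only [List.foldl_cons, hstep]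
      rw [ih (result ++ [cur]) [pvExtractY x] x.2.1 (by simp)]
      simp [pvG, hy]
  
theorem pv_G_grp (l : List (Int × Int × Int)) :
    ∀ (cur : List (Int × Int)) (y : Int),
      pvG cur y l = (cur ++ (l.takeWhile (fun n => n.2.1 == y)).map pvExtractY)
        :: pvGrp (l.dropWhile (fun n => n.2.1 == y)) := by
  induction l with
  | nil => intro cur y; simp [pvG, pvGrp]
  | cons x xs ih =>
    intro cur y
    by_cases hy : x.2.1 = y
    · rw [pvG, if_pos hy, ih, List.takeWhile_cons, List.dropWhile_cons]
      simp [hy]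
    · rw [pvG, if_neg hy, ih, List.takeWhile_cons, List.dropWhile_cons]
      have : (x.2.1 == y) = false := by simpa using hy
      simp only [this, Bool.false_eq_true, if_false, List.map_nil, List.append_nil]
      rw [pvGrp]
      simp

theorem pv_alt_grp (nodes : List (Int × Int × Int)) :
    groupByY_alt nodes = pvGrp nodes := by
  cases nodes with
  | nil => simp [groupByY_alt, pvFinishB, pvGrp]
  | cons x xs =>
    have hstep : pvStepB ([], [], none) x = ([], [pvExtractY x], some x.2.1) := by
      simp [pvStepB]
    rw [groupByY_alt, List.foldl_cons, hstep,
        pv_foldB xs [] [pvExtractY x] x.2.1 (by simp), pv_G_grp, pvGrp]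
    simp

-- ===== VERDICT (by name: the statement is the Claim_ definition above) =====
theorem groupByY_spec : Claim_equal_groupByY := by
  intro nodes _
  unfold Spec_groupByY
  rw [pv_alt_grp, groupByY, pv_outer_grp, List.drop_zero]
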